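-- pv_equiv track=rewrite | github.com/addiskers/nutrivision | backend/app/routes/coa.py | get_nutrient_category
-- ===== SOURCE A (Python) =====
-- def get_nutrient_category(nutrient_name: str) -> str:
--     """Categorize nutrient for organization"""
--     categories = {
--         "Macronutrient": ["Protein", "Total Fat", "Total Carbohydrates", "Energy", "Moisture", "Ash"],
--         "Fat - Saturated": ["Saturated Fat"],
--         "Fat - Unsaturated": ["Monounsaturated Fat", "Polyunsaturated Fat", "Linoleic Acid",
--                              "Alpha-Linolenic Acid", "DHA", "EPA"],
--         "Fat - Trans": ["Trans Fat"],
--         "Carbohydrate - Sugar": ["Total Sugars", "Added Sugars", "Sucrose", "Added Sucrose"],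
--         "Carbohydrate - Fiber": ["Dietary Fiber", "Soluble Fiber", "Insoluble Fiber",
--                                   "FOS (Fructooligosaccharides)"],
--         "Mineral": ["Sodium", "Potassium", "Calcium", "Iron", "Zinc", "Magnesium",
--                    "Phosphorus", "Chloride", "Cholesterol"],
--         "Vitamin - Fat Soluble": ["Vitamin A", "Vitamin D", "Vitamin D3", "Vitamin E"],
--         "Vitamin - Water Soluble": ["Vitamin C", "Vitamin B1", "Vitamin B2", "Vitamin B3",
--                                      "Vitamin B6", "Vitamin B12", "Folic Acid", "Biotin",
--                                      "Pantothenic Acid"],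
--     }
--
--     for category, nutrients in categories.items():
--         if nutrient_name in nutrients:
--             return category
--     return "Other"
-- ===== SOURCE B (Python) =====
-- _REVERSE = {
--     "Protein": "Macronutrient", "Total Fat": "Macronutrient",
--     "Total Carbohydrates": "Macronutrient", "Energy": "Macronutrient",
--     "Moisture": "Macronutrient", "Ash": "Macronutrient",
--     "Saturated Fat": "Fat - Saturated",
--     "Monounsaturated Fat": "Fat - Unsaturated", "Polyunsaturated Fat": "Fat - Unsaturated",
--     "Linoleic Acid": "Fat - Unsaturated", "Alpha-Linolenic Acid": "Fat - Unsaturated",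
--     "DHA": "Fat - Unsaturated", "EPA": "Fat - Unsaturated",
--     "Trans Fat": "Fat - Trans",
--     "Total Sugars": "Carbohydrate - Sugar", "Added Sugars": "Carbohydrate - Sugar",
--     "Sucrose": "Carbohydrate - Sugar", "Added Sucrose": "Carbohydrate - Sugar",
--     "Dietary Fiber": "Carbohydrate - Fiber", "Soluble Fiber": "Carbohydrate - Fiber",
--     "Insoluble Fiber": "Carbohydrate - Fiber",
--     "FOS (Fructooligosaccharides)": "Carbohydrate - Fiber",
--     "Sodium": "Mineral", "Potassium": "Mineral", "Calcium": "Mineral",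
--     "Iron": "Mineral", "Zinc": "Mineral", "Magnesium": "Mineral",
--     "Phosphorus": "Mineral", "Chloride": "Mineral", "Cholesterol": "Mineral",
--     "Vitamin A": "Vitamin - Fat Soluble", "Vitamin D": "Vitamin - Fat Soluble",
--     "Vitamin D3": "Vitamin - Fat Soluble", "Vitamin E": "Vitamin - Fat Soluble",
--     "Vitamin C": "Vitamin - Water Soluble", "Vitamin B1": "Vitamin - Water Soluble",
--     "Vitamin B2": "Vitamin - Water Soluble", "Vitamin B3": "Vitamin - Water Soluble",
--     "Vitamin B6": "Vitamin - Water Soluble", "Vitamin B12": "Vitamin - Water Soluble",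
--     "Folic Acid": "Vitamin - Water Soluble", "Biotin": "Vitamin - Water Soluble",
--     "Pantothenic Acid": "Vitamin - Water Soluble",
-- }
--
--
-- def get_nutrient_category(nutrient_name: str) -> str:
--     """Categorize nutrient for organization"""
--     return _REVERSE.get(nutrient_name, "Other")
-- ===== Notes on version B (the rewrite author's own statement) =====
-- stated objective: idiomatic
-- what changed: A loops over a category->list-of-names dict doing a list membership test per category; B precomputes the inverse flat name->category dict once and the function body is a single dict lookup with default 'Other', with no loop and no membership test.
import Mathlib
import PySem

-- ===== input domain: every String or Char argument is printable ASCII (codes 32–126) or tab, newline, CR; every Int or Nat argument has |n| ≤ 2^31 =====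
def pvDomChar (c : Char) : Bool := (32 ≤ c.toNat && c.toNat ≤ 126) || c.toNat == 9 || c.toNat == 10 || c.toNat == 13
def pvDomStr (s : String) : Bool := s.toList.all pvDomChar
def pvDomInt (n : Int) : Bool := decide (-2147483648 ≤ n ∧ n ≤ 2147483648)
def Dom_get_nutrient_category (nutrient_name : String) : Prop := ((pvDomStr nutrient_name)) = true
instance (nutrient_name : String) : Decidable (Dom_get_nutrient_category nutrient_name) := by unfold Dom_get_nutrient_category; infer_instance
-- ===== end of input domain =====

-- B replaces A's loop over a category→names table (with a membership test per category)
-- by one lookup in a flat name→category inverse table with default "Other" (objective: idiomatic).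

-- ===== PORT A =====
-- the dict literal `categories` of A, as an insertion-ordered items list (keys distinct)
def pvCategories : List (String × List String) :=
  [("Macronutrient", ["Protein", "Total Fat", "Total Carbohydrates", "Energy", "Moisture", "Ash"]),
   ("Fat - Saturated", ["Saturated Fat"]),
   ("Fat - Unsaturated", ["Monounsaturated Fat", "Polyunsaturated Fat", "Linoleic Acid",
                          "Alpha-Linolenic Acid", "DHA", "EPA"]),
   ("Fat - Trans", ["Trans Fat"]),
   ("Carbohydrate - Sugar", ["Total Sugars", "Added Sugars", "Sucrose", "Added Sucrose"]),
   ("Carbohydrate - Fiber", ["Dietary Fiber", "Soluble Fiber", "Insoluble Fiber",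
                             "FOS (Fructooligosaccharides)"]),
   ("Mineral", ["Sodium", "Potassium", "Calcium", "Iron", "Zinc", "Magnesium",
                "Phosphorus", "Chloride", "Cholesterol"]),
   ("Vitamin - Fat Soluble", ["Vitamin A", "Vitamin D", "Vitamin D3", "Vitamin E"]),
   ("Vitamin - Water Soluble", ["Vitamin C", "Vitamin B1", "Vitamin B2", "Vitamin B3",
                                "Vitamin B6", "Vitamin B12", "Folic Acid", "Biotin",
                                "Pantothenic Acid"])]

-- `for category, nutrients in categories.items(): if nutrient_name in nutrients: return category`
def pvLoopA : List (String × List String) → String → String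
  | [], _ => "Other"
  | (category, nutrients) :: rest, nutrient_name =>
      if nutrients.contains nutrient_name then category else pvLoopA rest nutrient_name

def get_nutrient_category (nutrient_name : String) : String :=
  pvLoopA pvCategories nutrient_name

-- ===== PORT B =====
-- the flat dict literal _REVERSE of Source B (insertion order, keys distinct)
def pvReverse : PySem.Dict String String := PySem.Dict.mk
  [("Protein", "Macronutrient"), ("Total Fat", "Macronutrient"),
   ("Total Carbohydrates", "Macronutrient"), ("Energy", "Macronutrient"),
   ("Moisture", "Macronutrient"), ("Ash", "Macronutrient"),
   ("Saturated Fat", "Fat - Saturated"),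
   ("Monounsaturated Fat", "Fat - Unsaturated"), ("Polyunsaturated Fat", "Fat - Unsaturated"),
   ("Linoleic Acid", "Fat - Unsaturated"), ("Alpha-Linolenic Acid", "Fat - Unsaturated"),
   ("DHA", "Fat - Unsaturated"), ("EPA", "Fat - Unsaturated"),
   ("Trans Fat", "Fat - Trans"),
   ("Total Sugars", "Carbohydrate - Sugar"), ("Added Sugars", "Carbohydrate - Sugar"),
   ("Sucrose", "Carbohydrate - Sugar"), ("Added Sucrose", "Carbohydrate - Sugar"),
   ("Dietary Fiber", "Carbohydrate - Fiber"), ("Soluble Fiber", "Carbohydrate - Fiber"),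
   ("Insoluble Fiber", "Carbohydrate - Fiber"),
   ("FOS (Fructooligosaccharides)", "Carbohydrate - Fiber"),
   ("Sodium", "Mineral"), ("Potassium", "Mineral"), ("Calcium", "Mineral"),
   ("Iron", "Mineral"), ("Zinc", "Mineral"), ("Magnesium", "Mineral"),
   ("Phosphorus", "Mineral"), ("Chloride", "Mineral"), ("Cholesterol", "Mineral"),
   ("Vitamin A", "Vitamin - Fat Soluble"), ("Vitamin D", "Vitamin - Fat Soluble"),
   ("Vitamin D3", "Vitamin - Fat Soluble"), ("Vitamin E", "Vitamin - Fat Soluble"),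
   ("Vitamin C", "Vitamin - Water Soluble"), ("Vitamin B1", "Vitamin - Water Soluble"),
   ("Vitamin B2", "Vitamin - Water Soluble"), ("Vitamin B3", "Vitamin - Water Soluble"),
   ("Vitamin B6", "Vitamin - Water Soluble"), ("Vitamin B12", "Vitamin - Water Soluble"),
   ("Folic Acid", "Vitamin - Water Soluble"), ("Biotin", "Vitamin - Water Soluble"),
   ("Pantothenic Acid", "Vitamin - Water Soluble")]

def get_nutrient_category_alt (nutrient_name : String) : String :=
  pvReverse.getD nutrient_name "Other"

-- ===== PRECONDITION & SPEC =====
def Spec_get_nutrient_category (nutrient_name : String) (out : String) : Prop := out = get_nutrient_category_alt nutrient_name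
instance (nutrient_name : String) (out : String) : Decidable (Spec_get_nutrient_category nutrient_name out) := by unfold Spec_get_nutrient_category; infer_instance

-- ===== CLAIM (what is proved, stated in full; the proofs are below) =====
def Claim_equal_get_nutrient_category : Prop := ∀ (nutrient_name : String), Dom_get_nutrient_category nutrient_name → Spec_get_nutrient_category nutrient_name (get_nutrient_category nutrient_name)

-- ===== LEMMAS AND PROOFS =====

-- flatten a category→names table into the name→category pairs, category by category
def pvFlatten (cats : List (String × List String)) : List (String × String) :=
  cats.flatMap (fun p => p.2.map (fun n => (n, p.1)))

-- first-match lookup in a block of pairs all carrying category c, then the rest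
theorem pv_get?_block (c s : String) (ns : List String) (rest : List (String × String)) :
    (PySem.Dict.mk ((ns.map (fun n => (n, c))) ++ rest)).get? s
      = if ns.contains s then some c else (PySem.Dict.mk rest).get? s := by
  induction ns with
  | nil => simp
  | cons n ns ih =>
      simp only [List.map_cons, List.cons_append, PySem.Dict.get?_mk_cons, ih,
        List.contains_cons]
      by_cases h : n = s
      · simp [h]
      · have h1 : (n == s) = false := beq_eq_false_iff_ne.mpr h
        have h2 : (s == n) = false := beq_eq_false_iff_ne.mpr (Ne.symm h)
        simp [h1, h2]

-- A's loop equals first-match lookup in the flattened table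
theorem pv_loop_eq_flat (cats : List (String × List String)) (s : String) :
    pvLoopA cats s = ((PySem.Dict.mk (pvFlatten cats)).get? s).getD "Other" := by
  induction cats with
  | nil => simp [pvLoopA, pvFlatten, PySem.Dict.get?]
  | cons p rest ih =>
      obtain ⟨c, ns⟩ := p
      simp only [pvLoopA, pvFlatten, List.flatMap_cons, pv_get?_block]
      split_ifs with h
      · simp
      · simpa [pvFlatten] using ih

theorem pv_flat_eq : pvFlatten pvCategories = pvReverse.items := by decide

-- ===== VERDICT (by name: the statement is the Claim_ definition above) =====
theorem get_nutrient_category_spec : Claim_equal_get_nutrient_category := by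
  intro s _
  unfold Spec_get_nutrient_category get_nutrient_category get_nutrient_category_alt
  rw [pv_loop_eq_flat, pv_flat_eq, PySem.Dict.getD_eq_get?_getD]
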